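-- pv_equiv track=rewrite | github.com/jinjiel1994/CIS210 | alphacode.py | argpharse
-- ===== SOURCE A (Python) =====
-- consonants = 'bcdfghjklmnpqrstvwyz'
--
-- vowels = 'aeiou'
--
-- def argpharse(pin):
--     a = pin % 100 # take out the last two digits
--     i = a//5
--     j = a%5
--     mnemonic = consonants[i] + vowels[j]
--     pin = pin//100
--     while pin > 0:
--         a = pin % 100
--         i = a//5
--         j = a%5
--         mnemonic = consonants[i] + vowels[j] + mnemonic
--         pin = pin//100
--     return mnemonic
-- ===== SOURCE B (Python) =====
-- consonants = 'bcdfghjklmnpqrstvwyz'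
--
-- vowels = 'aeiou'
--
-- def argpharse(pin):
--     hi, a = divmod(pin, 100)
--     chunk = consonants[a // 5] + vowels[a % 5]
--     return (argpharse(hi) if hi > 0 else '') + chunk
-- ===== Notes on version B (the rewrite author's own statement) =====
-- stated objective: simpler
-- what changed: Replaced the explicit while loop that prepends chunks onto an accumulator string with a direct recursion on the high-order part of the pin that builds the string most-significant-chunk-first via the call stack (using one divmod and a shared encode step).
import Mathlib
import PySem

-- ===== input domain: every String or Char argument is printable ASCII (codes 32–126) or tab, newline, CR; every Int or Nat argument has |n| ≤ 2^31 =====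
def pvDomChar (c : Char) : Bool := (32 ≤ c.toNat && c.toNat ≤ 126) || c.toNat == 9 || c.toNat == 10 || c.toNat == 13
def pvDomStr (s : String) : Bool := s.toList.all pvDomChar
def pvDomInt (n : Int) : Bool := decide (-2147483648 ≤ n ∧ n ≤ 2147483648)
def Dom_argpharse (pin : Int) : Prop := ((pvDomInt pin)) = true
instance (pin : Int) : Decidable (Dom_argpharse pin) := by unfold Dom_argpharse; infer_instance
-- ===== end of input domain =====

-- B replaces A's accumulator while-loop (prepend each chunk) by a direct recursion on pin//100
-- that emits the most significant chunk first via the call stack: simpler decomposition, same cost.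


-- ===== PORT A =====
-- strings are handled as List Char (joined into a String at the end), since Lean's own
-- String primitives are opaque to the kernel.
def consonantsL : List Char := ['b','c','d','f','g','h','j','k','l','m','n','p','q','r','s','t','v','w','y','z']

def vowelsL : List Char := ['a','e','i','o','u']

-- the while loop of A: state = (pin, mnemonic); each iteration prepends consonants[i] + vowels[j].
-- the indices i = (pin%100)//5 ∈ [0,20) and j = (pin%100)%5 ∈ [0,5) are always in range
-- (pin%100 ∈ [0,100) in Python), so pyGetD's default is never used.
def argLoopA (pin : Int) (mnemonic : List Char) : List Char :=
  if h : 0 < pin then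
    let a := PySem.Int.mod pin 100
    let i := PySem.Int.floordiv a 5
    let j := PySem.Int.mod a 5
    argLoopA (PySem.Int.floordiv pin 100)
      (PySem.List.pyGetD consonantsL i ' ' :: PySem.List.pyGetD vowelsL j ' ' :: mnemonic)
  else mnemonic
termination_by pin.toNat
decreasing_by
  rw [PySem.Int.floordiv_eq_ediv_of_pos (by norm_num : (0:Int) < 100)]
  omega

def argpharse (pin : Int) : String :=
  let a := PySem.Int.mod pin 100
  let i := PySem.Int.floordiv a 5
  let j := PySem.Int.mod a 5
  let mnemonic := [PySem.List.pyGetD consonantsL i ' ', PySem.List.pyGetD vowelsL j ' ']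
  String.ofList (argLoopA (PySem.Int.floordiv pin 100) mnemonic)

-- ===== PORT B =====
-- encode(a) = consonants[a//5] + vowels[a%5]
def encodeB (a : Int) : List Char :=
  [PySem.List.pyGetD consonantsL (PySem.Int.floordiv a 5) ' ',
   PySem.List.pyGetD vowelsL (PySem.Int.mod a 5) ' ']

def argRecB (pin : Int) : List Char :=
  (if h : 0 < PySem.Int.floordiv pin 100 then argRecB (PySem.Int.floordiv pin 100) else [])
    ++ encodeB (PySem.Int.mod pin 100)
termination_by pin.toNat
decreasing_by
  rw [PySem.Int.floordiv_eq_ediv_of_pos (by norm_num : (0:Int) < 100)] at h ⊢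
  omega

def argpharse_alt (pin : Int) : String := String.ofList (argRecB pin)

-- ===== PRECONDITION & SPEC =====
def Spec_argpharse (pin : Int) (out : String) : Prop := out = argpharse_alt pin
instance (pin : Int) (out : String) : Decidable (Spec_argpharse pin out) := by unfold Spec_argpharse; infer_instance

-- ===== CLAIM (what is proved, stated in full; the proofs are below) =====
def Claim_equal_argpharse : Prop := ∀ (pin : Int), Dom_argpharse pin → Spec_argpharse pin (argpharse pin)

-- ===== LEMMAS AND PROOFS =====

-- loop invariant: A's loop appended to an accumulator is B's recursion (guarded by 0 < pin) ++ accumulator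
theorem argLoopA_eq (pin : Int) (acc : List Char) :
    argLoopA pin acc = (if 0 < pin then argRecB pin else []) ++ acc := by
  induction pin, acc using argLoopA.induct with
  | case1 pin acc h a i j ih =>
    rw [argLoopA, dif_pos h]
    simp only []
    rw [ih, if_pos h]
    conv_rhs => rw [argRecB]
    rw [List.append_assoc]
    simp only [encodeB, dite_eq_ite]
    rfl
  | case2 pin acc h =>
    rw [argLoopA, dif_neg h, if_neg h, List.nil_append]

-- ===== VERDICT (by name: the statement is the Claim_ definition above) =====
theorem argpharse_spec : Claim_equal_argpharse := by
  intro pin _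
  show argpharse pin = argpharse_alt pin
  rw [argpharse, argpharse_alt, argLoopA_eq]
  conv_rhs => rw [argRecB]
  simp only [encodeB, dite_eq_ite]
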